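-- pv_equiv track=rewrite | github.com/Shnpl/CGMedGLM | utils/clustering.py | block_diagonalize
-- ===== SOURCE A (Python) =====
-- def block_diagonalize(matrix, threshold):
--     rows = len(matrix)
--     cols = len(matrix[0])
--     visited = [[False] * cols for _ in range(rows)]
--     blocks = []
--
--     def dfs(row, col, block):
--         if row < 0 or row >= rows or col < 0 or col >= cols or visited[row][col] or matrix[row][col] <= threshold:
--             return
--         visited[row][col] = True
--         block.append((row, col))
--         dfs(row - 1, col, block)  # 上方
--         dfs(row + 1, col, block)  # 下方
--         dfs(row, col - 1, block)  # 左侧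
--         dfs(row, col + 1, block)  # 右侧
--
--     for i in range(rows):
--         for j in range(cols):
--             if not visited[i][j] and matrix[i][j] > threshold:
--                 block = []
--                 dfs(i, j, block)
--                 blocks.append(block)
--
--     return blocks
-- ===== SOURCE B (Python) =====
-- def block_diagonalize(matrix, threshold):
--     rows = len(matrix)
--     cols = len(matrix[0])
--     live = {(r, c) for r in range(rows) for c in range(cols)
--             if matrix[r][c] > threshold}
--     visited = set()
--     blocks = []
--     for i in range(rows):
--         for j in range(cols):
--             if (i, j) in live and (i, j) not in visited:
--                 block = []
--                 stack = [(i, j)]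
--                 while stack:
--                     cell = stack.pop()
--                     if cell not in live or cell in visited:
--                         continue
--                     visited.add(cell)
--                     block.append(cell)
--                     r, c = cell
--                     stack += [(r, c + 1), (r, c - 1), (r + 1, c), (r - 1, c)]
--                 blocks.append(block)
--     return blocks
-- ===== Notes on version B (the rewrite author's own statement) =====
-- stated objective: alternative
-- what changed: The nested recursive dfs over a 2D visited-boolean grid is replaced by a recursion-free search over sets of coordinates: a 'live' set of in-bounds above-threshold cells is precomputed once, visited becomes a set of (row,col) pairs, and each component is collected with an explicit LIFO stack whose pop guard is a single membership test (cell in live and not in visited) instead of A's four bounds checks plus grid lookups.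
import Mathlib
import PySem

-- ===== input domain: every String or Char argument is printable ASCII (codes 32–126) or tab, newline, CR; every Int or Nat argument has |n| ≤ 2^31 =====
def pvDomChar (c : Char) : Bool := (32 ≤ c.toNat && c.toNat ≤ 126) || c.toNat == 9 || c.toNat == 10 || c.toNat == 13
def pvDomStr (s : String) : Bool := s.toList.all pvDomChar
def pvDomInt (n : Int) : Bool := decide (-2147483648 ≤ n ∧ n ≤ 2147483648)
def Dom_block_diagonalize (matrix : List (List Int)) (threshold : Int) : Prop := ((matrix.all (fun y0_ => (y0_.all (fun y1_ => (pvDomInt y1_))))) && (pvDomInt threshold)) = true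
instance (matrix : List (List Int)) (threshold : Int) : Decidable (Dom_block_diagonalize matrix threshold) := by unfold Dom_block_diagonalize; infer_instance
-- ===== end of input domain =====

-- B drops A's recursion and its 2D visited grid: it precomputes the set of in-bounds
-- above-threshold cells once and collects each component with an explicit stack over
-- coordinate sets, a recursion-free formulation of the same component scan.

-- ===== PORT A =====
-- matrix[r][c]; only evaluated after the bounds guard 0 ≤ r < rows, 0 ≤ c < cols,
-- so the Nat conversion and the defaults are never hit on admitted inputs (exact there).
def pvGM (matrix : List (List Int)) (r c : Int) : Int :=
  (matrix.getD r.toNat []).getD c.toNat 0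

-- visited[r][c]; same guard discipline as pvGM.
def pvGV (v : List (List Bool)) (r c : Int) : Bool :=
  (v.getD r.toNat []).getD c.toNat false

-- visited[r][c] = True (in-range assignment in Python; ports exactly under the guard).
def pvSV (v : List (List Bool)) (r c : Int) : List (List Bool) :=
  v.set r.toNat ((v.getD r.toNat []).set c.toNat true)

-- the early-return guard of dfs, literally A's condition in A's order.
def pvBad (matrix : List (List Int)) (threshold : Int) (v : List (List Bool)) (r c : Int) : Bool :=
  decide (r < 0) || decide ((matrix.length : Int) ≤ r) || decide (c < 0) ||
    decide (((matrix.headD []).length : Int) ≤ c) || pvGV v r c ||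
    decide (pvGM matrix r c ≤ threshold)

-- A's recursive dfs; state = (visited, block).  The Nat fuel is only a totality guard:
-- it is chosen ≥ rows*cols+1 at every call site, which is proved sufficient below.
def pvDfsA (matrix : List (List Int)) (threshold : Int) :
    Nat → Int → Int → List (List Bool) × List (Int × Int) → List (List Bool) × List (Int × Int)
  | 0, _, _, st => st
  | f + 1, r, c, st =>
    if pvBad matrix threshold st.1 r c then st
    else  -- the four recursive calls in A's order (up, down, left, right), innermost first
      pvDfsA matrix threshold f r (c + 1)
        (pvDfsA matrix threshold f r (c - 1)
          (pvDfsA matrix threshold f (r + 1) c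
            (pvDfsA matrix threshold f (r - 1) c (pvSV st.1 r c, st.2 ++ [(r, c)]))))

def block_diagonalize (matrix : List (List Int)) (threshold : Int) : List (List (Int × Int)) :=
  let rows := matrix.length
  let cols := (matrix.headD []).length
  let init : List (List Bool) × List (List (Int × Int)) :=
    (List.replicate rows (List.replicate cols false), [])
  let fin := (List.range rows).foldl (fun acc (i : Nat) =>
    (List.range cols).foldl (fun acc (j : Nat) =>
      if !pvGV acc.1 (i : Int) (j : Int) && decide (threshold < pvGM matrix (i : Int) (j : Int)) then
        let res := pvDfsA matrix threshold (rows * cols + 1) (i : Int) (j : Int) (acc.1, [])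
        (res.1, acc.2 ++ [res.2])
      else acc) acc) init
  fin.2

-- ===== PORT B =====
-- Source B's set comprehension: the in-bounds cells whose value exceeds the threshold.
def pvLive (matrix : List (List Int)) (threshold : Int) : PySem.Set (Int × Int) :=
  PySem.Set.ofList ((List.range matrix.length).flatMap (fun r =>
    (List.range (matrix.headD []).length).filterMap (fun c =>
      if threshold < (matrix.getD r []).getD c 0 then some ((r : Int), (c : Int)) else none)))

-- Source B's while loop; state = (visited coordinate set, block).  List head = top of the
-- stack, so the four Python pushes leave up/down/left/right on top in that pop order.
-- Fuel is only a totality guard, chosen sufficient at the call site (proved below).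
def pvWalk (live : PySem.Set (Int × Int)) :
    Nat → List (Int × Int) → PySem.Set (Int × Int) × List (Int × Int) →
      PySem.Set (Int × Int) × List (Int × Int)
  | 0, _, st => st
  | _ + 1, [], st => st
  | f + 1, cell :: rest, (vis, block) =>
    if !(PySem.Set.contains live cell) || PySem.Set.contains vis cell then
      pvWalk live f rest (vis, block)
    else
      pvWalk live f
        ((cell.1 - 1, cell.2) :: (cell.1 + 1, cell.2) ::
          (cell.1, cell.2 - 1) :: (cell.1, cell.2 + 1) :: rest)
        (PySem.Set.add vis cell, block ++ [cell])

def block_diagonalize_alt (matrix : List (List Int)) (threshold : Int) : List (List (Int × Int)) :=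
  let rows := matrix.length
  let cols := (matrix.headD []).length
  let live := pvLive matrix threshold
  let fin := (List.range rows).foldl (fun acc (i : Nat) =>
    (List.range cols).foldl (fun acc (j : Nat) =>
      if PySem.Set.contains live ((i : Int), (j : Int)) &&
          !(PySem.Set.contains acc.1 ((i : Int), (j : Int))) then
        let res := pvWalk live (4 * (rows * cols) + 1) [((i : Int), (j : Int))] (acc.1, [])
        (res.1, acc.2 ++ [res.2])
      else acc) acc) (PySem.Set.empty, [])
  fin.2

-- ===== PRECONDITION & SPEC =====
-- Pre_ excludes exactly the inputs on which Python A raises IndexError: the empty matrix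
-- (len(matrix[0])), and ragged matrices with some row shorter than row 0 (matrix[i][j]
-- is eventually evaluated at such a missing cell).
def Pre_block_diagonalize (matrix : List (List Int)) (threshold : Int) : Prop :=
  matrix ≠ [] ∧ ∀ row ∈ matrix, (matrix.headD []).length ≤ row.length

instance (matrix : List (List Int)) (threshold : Int) : Decidable (Pre_block_diagonalize matrix threshold) := by
  unfold Pre_block_diagonalize; infer_instance

def pvWitness_block_diagonalize : List (List Int) × Int := ([[1, 0], [0, 1]], 0)

def Spec_block_diagonalize (matrix : List (List Int)) (threshold : Int) (out : List (List (Int × Int))) : Prop := out = block_diagonalize_alt matrix threshold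
instance (matrix : List (List Int)) (threshold : Int) (out : List (List (Int × Int))) : Decidable (Spec_block_diagonalize matrix threshold out) := by unfold Spec_block_diagonalize; infer_instance

-- ===== CLAIM (what is proved, stated in full; the proofs are below) =====
def Claim_equal_block_diagonalize : Prop := ∀ (matrix : List (List Int)) (threshold : Int), Dom_block_diagonalize matrix threshold → Pre_block_diagonalize matrix threshold → Spec_block_diagonalize matrix threshold (block_diagonalize matrix threshold)

-- ===== LEMMAS AND PROOFS =====

-- Proof-only middle layer: A's dfs rewritten as a stack loop over the SAME 2D visited
-- grid.  Step 1 proves block_diagonalize = the fold over pvMidLoop bodies; step 2 is a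
-- simulation between the 2D grid (pvMidLoop) and B's coordinate sets (pvWalk).
def pvMidLoop (matrix : List (List Int)) (threshold : Int) :
    Nat → List (Int × Int) → List (List Bool) × List (Int × Int) → List (List Bool) × List (Int × Int)
  | 0, _, st => st
  | _ + 1, [], st => st
  | f + 1, (r, c) :: rest, st =>
    if pvBad matrix threshold st.1 r c then pvMidLoop matrix threshold f rest st
    else pvMidLoop matrix threshold f
      ((r - 1, c) :: (r + 1, c) :: (r, c - 1) :: (r, c + 1) :: rest)
      (pvSV st.1 r c, st.2 ++ [(r, c)])

-- number of unvisited cells: the decreasing measure of both traversals.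
def pvUnvis (v : List (List Bool)) : Nat := (v.map (List.count false)).sum

-- shape invariant of the visited grid.
def pvDims (matrix : List (List Int)) (v : List (List Bool)) : Prop :=
  v.length = matrix.length ∧ ∀ row ∈ v, row.length = (matrix.headD []).length

lemma pv_count_set_true_le (l : List Bool) (i : Nat) :
    (l.set i true).count false ≤ l.count false := by
  induction l generalizing i with
  | nil => simp
  | cons a t ih =>
    cases i with
    | zero => cases a <;> simp
    | succ n => simpa [List.count_cons] using ih n

lemma pv_count_set_true (l : List Bool) (i : Nat) (hi : i < l.length)
    (hf : l.getD i false = false) : (l.set i true).count false + 1 = l.count false := by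
  induction l generalizing i with
  | nil => simp at hi
  | cons a t ih =>
    cases i with
    | zero => simp_all
    | succ n =>
      simp only [List.length_cons] at hi
      simp only [List.getD_cons_succ] at hf
      have := ih n (by omega) hf
      simp [List.count_cons]; omega

lemma pv_unvis_set (v : List (List Bool)) (i : Nat) (row' : List Bool) (hi : i < v.length) :
    pvUnvis (v.set i row') + (v.getD i []).count false = pvUnvis v + row'.count false := by
  induction v generalizing i with
  | nil => simp at hi
  | cons a t ih =>
    cases i with
    | zero => simp [pvUnvis]; omega
    | succ n =>
      simp only [List.length_cons] at hi
      have := ih n (by omega)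
      simp only [pvUnvis, List.set_cons_succ, List.map_cons, List.sum_cons, List.getD_cons_succ] at *
      omega

lemma pv_unvis_sv_le (v : List (List Bool)) (r c : Int) :
    pvUnvis (pvSV v r c) ≤ pvUnvis v := by
  unfold pvSV
  by_cases hr : r.toNat < v.length
  · have h := pv_unvis_set v r.toNat ((v.getD r.toNat []).set c.toNat true) hr
    have := pv_count_set_true_le (v.getD r.toNat []) c.toNat
    omega
  · rw [List.set_eq_of_length_le (by omega)]

lemma pv_unvis_sv_succ (v : List (List Bool)) (r c : Int)
    (hr : r.toNat < v.length) (hc : c.toNat < (v.getD r.toNat []).length)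
    (hf : (v.getD r.toNat []).getD c.toNat false = false) :
    pvUnvis (pvSV v r c) + 1 = pvUnvis v := by
  unfold pvSV
  have h := pv_unvis_set v r.toNat ((v.getD r.toNat []).set c.toNat true) hr
  have := pv_count_set_true (v.getD r.toNat []) c.toNat hc hf
  omega

lemma pv_dims_sv (matrix : List (List Int)) (v : List (List Bool)) (r c : Int)
    (h : pvDims matrix v) : pvDims matrix (pvSV v r c) := by
  obtain ⟨h1, h2⟩ := h
  by_cases hr : r.toNat < v.length
  · refine ⟨by simp [pvSV, h1], ?_⟩
    intro row hrow
    rcases List.mem_or_eq_of_mem_set hrow with hm | he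
    · exact h2 row hm
    · subst he
      rw [List.length_set]
      refine h2 _ ?_
      rw [List.getD_eq_getElem _ _ hr]; exact List.getElem_mem hr
  · unfold pvSV
    rw [List.set_eq_of_length_le (by omega)]
    exact ⟨h1, h2⟩

lemma pv_unvis_le (v : List (List Bool)) (C : Nat)
    (h : ∀ row ∈ v, row.length = C) : pvUnvis v ≤ v.length * C := by
  induction v with
  | nil => simp [pvUnvis]
  | cons a t ih =>
    have h1 : a.length = C := h a (by simp)
    have h2 := ih (fun row hr => h row (by simp [hr]))
    have h3 : a.count false ≤ a.length := List.count_le_length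
    simp only [pvUnvis, List.map_cons, List.sum_cons, List.length_cons] at *
    calc a.count false + (t.map (List.count false)).sum ≤ C + t.length * C := by omega
      _ = (t.length + 1) * C := by ring

-- unpacking of "the guard is false".
lemma pv_bad_false (matrix : List (List Int)) (threshold : Int) (v : List (List Bool)) (r c : Int)
    (hd : pvDims matrix v) (h : ¬ pvBad matrix threshold v r c = true) :
    r.toNat < v.length ∧ c.toNat < (v.getD r.toNat []).length ∧
      (v.getD r.toNat []).getD c.toNat false = false := by
  simp only [pvBad, Bool.or_eq_true, decide_eq_true_eq, not_or, pvGV, Bool.not_eq_true] at h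
  obtain ⟨⟨⟨⟨⟨h1, h2⟩, h3⟩, h4⟩, h5⟩, -⟩ := h
  obtain ⟨hl, hrows⟩ := hd
  have hr : r.toNat < v.length := by omega
  have hmem : v.getD r.toNat [] ∈ v := by
    rw [List.getD_eq_getElem _ _ hr]; exact List.getElem_mem hr
  have hrow : (v.getD r.toNat []).length = (matrix.headD []).length := hrows _ hmem
  exact ⟨hr, by omega, h5⟩

-- the Int-level bounds extracted from a false guard.
lemma pv_bad_false_int (matrix : List (List Int)) (threshold : Int) (v : List (List Bool)) (r c : Int)
    (h : ¬ pvBad matrix threshold v r c = true) :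
    0 ≤ r ∧ r < (matrix.length : Int) ∧ 0 ≤ c ∧ c < ((matrix.headD []).length : Int) := by
  simp only [pvBad, Bool.or_eq_true, decide_eq_true_eq, not_or] at h
  omega

lemma pv_dfs_dims_unvis (matrix : List (List Int)) (threshold : Int) :
    ∀ (f : Nat) (r c : Int) (st : List (List Bool) × List (Int × Int)),
      pvDims matrix st.1 →
      pvDims matrix (pvDfsA matrix threshold f r c st).1 ∧
        pvUnvis (pvDfsA matrix threshold f r c st).1 ≤ pvUnvis st.1 := by
  intro f
  induction f with
  | zero => intro r c st h; rw [pvDfsA]; exact ⟨h, le_refl _⟩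
  | succ f ih =>
    intro r c st h
    rw [pvDfsA]
    split
    · exact ⟨h, le_refl _⟩
    · have hd1 : pvDims matrix (pvSV st.1 r c) := pv_dims_sv _ _ _ _ h
      have hu1 := pv_unvis_sv_le st.1 r c
      obtain ⟨d1, u1⟩ := ih (r - 1) c (pvSV st.1 r c, st.2 ++ [(r, c)]) hd1
      obtain ⟨d2, u2⟩ := ih (r + 1) c _ d1
      obtain ⟨d3, u3⟩ := ih r (c - 1) _ d2
      obtain ⟨d4, u4⟩ := ih r (c + 1) _ d3
      refine ⟨d4, ?_⟩
      have e0 : pvUnvis ((pvSV st.1 r c, st.2 ++ [(r, c)]) :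
          List (List Bool) × List (Int × Int)).1 = pvUnvis (pvSV st.1 r c) := rfl
      omega

lemma pv_dfs_fuel (matrix : List (List Int)) (threshold : Int) :
    ∀ (n : Nat) (st : List (List Bool) × List (Int × Int)) (r c : Int) (f f' : Nat),
      pvUnvis st.1 ≤ n → pvDims matrix st.1 → pvUnvis st.1 < f → pvUnvis st.1 < f' →
      pvDfsA matrix threshold f r c st = pvDfsA matrix threshold f' r c st := by
  intro n
  induction n with
  | zero =>
    intro st r c f f' hn hd hf hf'
    obtain ⟨f0, rfl⟩ : ∃ f0, f = f0 + 1 := ⟨f - 1, by omega⟩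
    obtain ⟨f0', rfl⟩ : ∃ f0', f' = f0' + 1 := ⟨f' - 1, by omega⟩
    rw [pvDfsA, pvDfsA]
    split
    · rfl
    · rename_i hbad
      obtain ⟨hr, hc, hfalse⟩ := pv_bad_false matrix threshold st.1 r c hd hbad
      have := pv_unvis_sv_succ st.1 r c hr hc hfalse
      omega
  | succ n ih =>
    intro st r c f f' hn hd hf hf'
    obtain ⟨f0, rfl⟩ : ∃ f0, f = f0 + 1 := ⟨f - 1, by omega⟩
    obtain ⟨f0', rfl⟩ : ∃ f0', f' = f0' + 1 := ⟨f' - 1, by omega⟩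
    rw [pvDfsA, pvDfsA]
    split
    · rfl
    · rename_i hbad
      obtain ⟨hr, hc, hfalse⟩ := pv_bad_false matrix threshold st.1 r c hd hbad
      have hsucc := pv_unvis_sv_succ st.1 r c hr hc hfalse
      have hd1 : pvDims matrix (pvSV st.1 r c) := pv_dims_sv _ _ _ _ hd
      have e1 : pvDfsA matrix threshold f0 (r - 1) c (pvSV st.1 r c, st.2 ++ [(r, c)]) =
          pvDfsA matrix threshold f0' (r - 1) c (pvSV st.1 r c, st.2 ++ [(r, c)]) :=
        ih (pvSV st.1 r c, st.2 ++ [(r, c)]) (r - 1) c f0 f0'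
          (show pvUnvis (pvSV st.1 r c) ≤ n by omega) hd1
          (show pvUnvis (pvSV st.1 r c) < f0 by omega)
          (show pvUnvis (pvSV st.1 r c) < f0' by omega)
      obtain ⟨d1, u1⟩ := pv_dfs_dims_unvis matrix threshold f0' (r - 1) c
        (pvSV st.1 r c, st.2 ++ [(r, c)]) hd1
      rw [e1]
      set s1 := pvDfsA matrix threshold f0' (r - 1) c (pvSV st.1 r c, st.2 ++ [(r, c)])
      have u1' : pvUnvis s1.1 ≤ pvUnvis (pvSV st.1 r c) := u1
      have e2 : pvDfsA matrix threshold f0 (r + 1) c s1 = pvDfsA matrix threshold f0' (r + 1) c s1 :=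
        ih s1 (r + 1) c f0 f0' (by omega) d1 (by omega) (by omega)
      obtain ⟨d2, u2⟩ := pv_dfs_dims_unvis matrix threshold f0' (r + 1) c s1 d1
      rw [e2]
      set s2 := pvDfsA matrix threshold f0' (r + 1) c s1
      have e3 : pvDfsA matrix threshold f0 r (c - 1) s2 = pvDfsA matrix threshold f0' r (c - 1) s2 :=
        ih s2 r (c - 1) f0 f0' (by omega) d2 (by omega) (by omega)
      obtain ⟨d3, u3⟩ := pv_dfs_dims_unvis matrix threshold f0' r (c - 1) s2 d2
      rw [e3]
      set s3 := pvDfsA matrix threshold f0' r (c - 1) s2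
      exact ih s3 r (c + 1) f0 f0' (by omega) d3 (by omega) (by omega)

-- the 2D-grid stack loop computes the left fold of dfs (with canonical fuel) over the stack.
lemma pv_loop_fold (matrix : List (List Int)) (threshold : Int) :
    ∀ (f : Nat) (s : List (Int × Int)) (st : List (List Bool) × List (Int × Int)),
      pvDims matrix st.1 → s.length + 4 * pvUnvis st.1 ≤ f →
      pvMidLoop matrix threshold f s st =
        s.foldl (fun st' p => pvDfsA matrix threshold (pvUnvis st'.1 + 1) p.1 p.2 st') st := by
  intro f
  induction f with
  | zero =>
    intro s st hd hm
    have : s = [] := by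
      cases s with
      | nil => rfl
      | cons a t => simp at hm
    subst this; rfl
  | succ f ih =>
    intro s st hd hm
    cases s with
    | nil => rfl
    | cons p rest =>
      obtain ⟨r, c⟩ := p
      rw [pvMidLoop]
      simp only [List.foldl_cons]
      by_cases hbad : pvBad matrix threshold st.1 r c = true
      · rw [if_pos hbad]
        have hdfs : pvDfsA matrix threshold (pvUnvis st.1 + 1) r c st = st := by
          rw [pvDfsA, if_pos hbad]
        rw [hdfs]
        exact ih rest st hd (by simp at hm ⊢; omega)
      · rw [if_neg hbad]
        obtain ⟨hr, hc, hfalse⟩ := pv_bad_false matrix threshold st.1 r c hd hbad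
        have hsucc := pv_unvis_sv_succ st.1 r c hr hc hfalse
        have hd1 : pvDims matrix (pvSV st.1 r c) := pv_dims_sv _ _ _ _ hd
        have hstep := ih ((r - 1, c) :: (r + 1, c) :: (r, c - 1) :: (r, c + 1) :: rest)
          (pvSV st.1 r c, st.2 ++ [(r, c)]) hd1
          (by simp only [List.length_cons] at hm ⊢
              have e0 : pvUnvis ((pvSV st.1 r c, st.2 ++ [(r, c)]) :
                  List (List Bool) × List (Int × Int)).1 = pvUnvis (pvSV st.1 r c) := rfl
              omega)
        rw [hstep]
        simp only [List.foldl_cons]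
        have hdfs : pvDfsA matrix threshold (pvUnvis st.1 + 1) r c st =
            pvDfsA matrix threshold (pvUnvis st.1) r (c + 1)
              (pvDfsA matrix threshold (pvUnvis st.1) r (c - 1)
                (pvDfsA matrix threshold (pvUnvis st.1) (r + 1) c
                  (pvDfsA matrix threshold (pvUnvis st.1) (r - 1) c
                    (pvSV st.1 r c, st.2 ++ [(r, c)])))) := by
          rw [pvDfsA, if_neg hbad]
        rw [hdfs]
        have e1 : pvDfsA matrix threshold (pvUnvis st.1) (r - 1) c
              (pvSV st.1 r c, st.2 ++ [(r, c)]) =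
            pvDfsA matrix threshold (pvUnvis (pvSV st.1 r c) + 1) (r - 1) c
              (pvSV st.1 r c, st.2 ++ [(r, c)]) :=
          pv_dfs_fuel matrix threshold (pvUnvis (pvSV st.1 r c))
            (pvSV st.1 r c, st.2 ++ [(r, c)]) (r - 1) c _ _ (le_refl _) hd1
            (show pvUnvis (pvSV st.1 r c) < _ by omega)
            (show pvUnvis (pvSV st.1 r c) < _ by omega)
        rw [e1]
        obtain ⟨d1, u1⟩ := pv_dfs_dims_unvis matrix threshold (pvUnvis (pvSV st.1 r c) + 1)
          (r - 1) c (pvSV st.1 r c, st.2 ++ [(r, c)]) hd1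
        set s1 := pvDfsA matrix threshold (pvUnvis (pvSV st.1 r c) + 1) (r - 1) c
          (pvSV st.1 r c, st.2 ++ [(r, c)])
        have u1' : pvUnvis s1.1 ≤ pvUnvis (pvSV st.1 r c) := u1
        have e2 : pvDfsA matrix threshold (pvUnvis st.1) (r + 1) c s1 =
            pvDfsA matrix threshold (pvUnvis s1.1 + 1) (r + 1) c s1 :=
          pv_dfs_fuel matrix threshold (pvUnvis s1.1) s1 (r + 1) c _ _ (le_refl _) d1
            (by omega) (by omega)
        rw [e2]
        obtain ⟨d2, u2⟩ := pv_dfs_dims_unvis matrix threshold (pvUnvis s1.1 + 1) (r + 1) c s1 d1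
        set s2 := pvDfsA matrix threshold (pvUnvis s1.1 + 1) (r + 1) c s1
        have e3 : pvDfsA matrix threshold (pvUnvis st.1) r (c - 1) s2 =
            pvDfsA matrix threshold (pvUnvis s2.1 + 1) r (c - 1) s2 :=
          pv_dfs_fuel matrix threshold (pvUnvis s2.1) s2 r (c - 1) _ _ (le_refl _) d2
            (by omega) (by omega)
        rw [e3]
        obtain ⟨d3, u3⟩ := pv_dfs_dims_unvis matrix threshold (pvUnvis s2.1 + 1) r (c - 1) s2 d2
        set s3 := pvDfsA matrix threshold (pvUnvis s2.1 + 1) r (c - 1) s2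
        have e4 : pvDfsA matrix threshold (pvUnvis st.1) r (c + 1) s3 =
            pvDfsA matrix threshold (pvUnvis s3.1 + 1) r (c + 1) s3 :=
          pv_dfs_fuel matrix threshold (pvUnvis s3.1) s3 r (c + 1) _ _ (le_refl _) d3
            (by omega) (by omega)
        rw [e4]

-- one inner-loop body of the middle layer equals one inner-loop body of A.
lemma pv_body_eq (matrix : List (List Int)) (threshold : Int) (v : List (List Bool))
    (hd : pvDims matrix v) (i j : Int) :
    pvMidLoop matrix threshold (4 * (matrix.length * (matrix.headD []).length) + 1) [(i, j)] (v, []) =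
      pvDfsA matrix threshold (matrix.length * (matrix.headD []).length + 1) i j (v, []) := by
  have hle : pvUnvis v ≤ matrix.length * (matrix.headD []).length := by
    have := pv_unvis_le v (matrix.headD []).length hd.2
    rw [hd.1] at this
    exact this
  have e0 : pvUnvis ((v, []) : List (List Bool) × List (Int × Int)).1 = pvUnvis v := rfl
  rw [pv_loop_fold matrix threshold _ [(i, j)] (v, []) hd
    (by simp only [List.length_cons, List.length_nil]; omega)]
  simp only [List.foldl_cons, List.foldl_nil]
  exact pv_dfs_fuel matrix threshold (pvUnvis v) (v, []) i j _ _ (le_of_eq e0) hd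
    (by omega) (by omega)

lemma pv_foldl_preserves {α β : Type} (P : α → Prop) (f : α → β → α)
    (h : ∀ a b, P a → P (f a b)) : ∀ (l : List β) (a : α), P a → P (l.foldl f a) := by
  intro l
  induction l with
  | nil => intro a ha; exact ha
  | cons b t ih => intro a ha; exact ih _ (h a b ha)

lemma pv_foldl_eq_of {α β : Type} (P : α → Prop) (f g : α → β → α)
    (h1 : ∀ a b, P a → f a b = g a b) (h2 : ∀ a b, P a → P (f a b)) :
    ∀ (l : List β) (a : α), P a → l.foldl f a = l.foldl g a := by
  intro l
  induction l with
  | nil => intro a _; rfl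
  | cons b t ih =>
    intro a ha
    simp only [List.foldl_cons]
    rw [← h1 a b ha]
    exact ih _ (h2 a b ha)

-- ===== step 2: simulation between the 2D grid and B's coordinate sets =====

-- membership in Source B's live set, characterised.
lemma pv_live_mem (matrix : List (List Int)) (threshold : Int) (r c : Int) :
    (r, c) ∈ pvLive matrix threshold ↔
      0 ≤ r ∧ r < (matrix.length : Int) ∧ 0 ≤ c ∧ c < ((matrix.headD []).length : Int) ∧
        threshold < pvGM matrix r c := by
  unfold pvLive
  rw [PySem.Set.mem_ofList]
  simp only [List.mem_flatMap, List.mem_filterMap, List.mem_range]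
  constructor
  · rintro ⟨rn, hrn, cn, hcn, hif⟩
    by_cases hth : threshold < (matrix.getD rn []).getD cn 0
    · rw [if_pos hth] at hif
      obtain ⟨hr, hc⟩ := Prod.mk.injEq .. ▸ (Option.some.injEq .. ▸ hif)
      subst hr; subst hc
      refine ⟨by positivity, by exact_mod_cast hrn, by positivity, by exact_mod_cast hcn, ?_⟩
      simpa [pvGM] using hth
    · rw [if_neg hth] at hif; exact absurd hif (by simp)
  · rintro ⟨h1, h2, h3, h4, h5⟩
    refine ⟨r.toNat, by omega, c.toNat, by omega, ?_⟩
    rw [if_pos (by simpa [pvGM] using h5)]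
    simp [Int.toNat_of_nonneg h1, Int.toNat_of_nonneg h3]

-- correspondence between A's 2D visited grid and B's visited coordinate set.
def pvRel (matrix : List (List Int)) (v : List (List Bool)) (vis : PySem.Set (Int × Int)) : Prop :=
  pvDims matrix v ∧
    ∀ r c : Int, 0 ≤ r → r < (matrix.length : Int) → 0 ≤ c → c < ((matrix.headD []).length : Int) →
      (pvGV v r c = true ↔ (r, c) ∈ vis)

-- dfs's guard equals Source B's pop guard under the correspondence.
lemma pv_guard_eq (matrix : List (List Int)) (threshold : Int) (v : List (List Bool))
    (vis : PySem.Set (Int × Int)) (h : pvRel matrix v vis) (r c : Int) :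
    pvBad matrix threshold v r c =
      (!(PySem.Set.contains (pvLive matrix threshold) (r, c)) || PySem.Set.contains vis (r, c)) := by
  have hlive : PySem.Set.contains (pvLive matrix threshold) (r, c) =
      decide (0 ≤ r ∧ r < (matrix.length : Int) ∧ 0 ≤ c ∧ c < ((matrix.headD []).length : Int) ∧
        threshold < pvGM matrix r c) := by
    rw [Bool.eq_iff_iff]
    simp [pv_live_mem]
  rw [hlive]
  by_cases hin : 0 ≤ r ∧ r < (matrix.length : Int) ∧ 0 ≤ c ∧ c < ((matrix.headD []).length : Int)
  · obtain ⟨h1, h2, h3, h4⟩ := hin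
    have hvis : PySem.Set.contains vis (r, c) = pvGV v r c := by
      rw [Bool.eq_iff_iff, PySem.Set.contains_iff]
      exact (h.2 r c h1 h2 h3 h4).symm
    rw [hvis]
    unfold pvBad
    rw [Bool.eq_iff_iff]
    simp only [Bool.or_eq_true, Bool.not_eq_true', decide_eq_true_eq, decide_eq_false_iff_not,
      not_and, not_lt]
    constructor
    · rintro ((((h' | h') | h') | hb) | hth)
      · omega
      · omega
      · omega
      · exact Or.inr hb
      · exact Or.inl (fun _ _ _ _ => hth)
    · rintro (hnl | hb)
      · exact Or.inr (hnl h1 h2 h3 h4)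
      · exact Or.inl (Or.inr hb)
  · rw [Bool.eq_iff_iff]
    unfold pvBad
    simp only [Bool.or_eq_true, Bool.not_eq_true', decide_eq_true_eq, decide_eq_false_iff_not,
      not_and, not_lt]
    constructor
    · intro _
      exact Or.inl (fun h1 h2 h3 h4 => absurd ⟨h1, h2, h3, h4⟩ hin)
    · intro _
      have hd : r < 0 ∨ (matrix.length : Int) ≤ r ∨ c < 0 ∨ ((matrix.headD []).length : Int) ≤ c := by
        by_contra hno
        rw [not_or, not_or, not_or] at hno
        exact hin ⟨by omega, by omega, by omega, by omega⟩
      rcases hd with h' | h' | h' | h'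
      · exact Or.inl (Or.inl (Or.inl (Or.inl (Or.inl h'))))
      · exact Or.inl (Or.inl (Or.inl (Or.inl (Or.inr h'))))
      · exact Or.inl (Or.inl (Or.inl (Or.inr h')))
      · exact Or.inl (Or.inl (Or.inr h'))

-- setting one in-range cell in the grid, read back anywhere.
lemma pv_gv_sv (v : List (List Bool)) (r c r' c' : Int)
    (h0r : 0 ≤ r) (h0c : 0 ≤ c) (h0r' : 0 ≤ r') (h0c' : 0 ≤ c')
    (hr : r.toNat < v.length) (hc : c.toNat < (v.getD r.toNat []).length) :
    pvGV (pvSV v r c) r' c' = if r' = r ∧ c' = c then true else pvGV v r' c' := by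
  unfold pvGV pvSV
  by_cases hre : r'.toNat = r.toNat
  · have hgd : (v.set r.toNat ((v.getD r.toNat []).set c.toNat true)).getD r'.toNat [] =
        (v.getD r.toNat []).set c.toNat true := by
      rw [hre, List.getD_eq_getElem _ _ (by simpa using hr)]
      exact List.getElem_set_self (by simpa using hr)
    rw [hgd]
    by_cases hce : c'.toNat = c.toNat
    · rw [if_pos (by omega), hce, List.getD_eq_getElem _ _ (by simpa using hc)]
      exact List.getElem_set_self (by simpa using hc)
    · rw [if_neg (by omega), hre]
      by_cases hlt : c'.toNat < (v.getD r.toNat []).length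
      · rw [List.getD_eq_getElem _ _ (by simpa using hlt), List.getD_eq_getElem _ _ hlt]
        exact List.getElem_set_ne (by omega) (by simpa using hlt)
      · rw [List.getD_eq_default _ _ (by simpa using (by omega : (v.getD r.toNat []).length ≤ c'.toNat)),
          List.getD_eq_default _ _ (by omega)]
  · rw [if_neg (by omega)]
    have hgd : (v.set r.toNat ((v.getD r.toNat []).set c.toNat true)).getD r'.toNat [] =
        v.getD r'.toNat [] := by
      by_cases hlt : r'.toNat < v.length
      · rw [List.getD_eq_getElem _ _ (by simpa using hlt), List.getD_eq_getElem _ _ hlt]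
        exact List.getElem_set_ne (by omega) (by simpa using hlt)
      · rw [List.getD_eq_default _ _ (by simpa using (by omega : v.length ≤ r'.toNat)),
          List.getD_eq_default _ _ (by omega)]
    rw [hgd]

-- the correspondence is preserved by one visit.
lemma pv_rel_sv (matrix : List (List Int)) (threshold : Int) (v : List (List Bool))
    (vis : PySem.Set (Int × Int)) (r c : Int) (h : pvRel matrix v vis)
    (hbad : ¬ pvBad matrix threshold v r c = true) :
    pvRel matrix (pvSV v r c) (PySem.Set.add vis (r, c)) := by
  obtain ⟨h1, h2, h3, h4⟩ := pv_bad_false_int matrix threshold v r c hbad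
  obtain ⟨hr, hc, -⟩ := pv_bad_false matrix threshold v r c h.1 hbad
  refine ⟨pv_dims_sv matrix v r c h.1, ?_⟩
  intro r' c' g1 g2 g3 g4
  rw [pv_gv_sv v r c r' c' h1 h3 g1 g3 hr hc, PySem.Set.mem_add]
  split
  · rename_i he
    simp [he.1, he.2]
  · rename_i hne
    rw [h.2 r' c' g1 g2 g3 g4]
    constructor
    · exact Or.inl
    · rintro (hv | he)
      · exact hv
      · exact absurd (Prod.mk.injEq .. ▸ he) (by tauto)

-- the 2D-grid stack loop and Source B's set-based stack loop run in lockstep.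
lemma pv_walk_sim (matrix : List (List Int)) (threshold : Int) :
    ∀ (f : Nat) (stack : List (Int × Int)) (v : List (List Bool))
      (vis : PySem.Set (Int × Int)) (block : List (Int × Int)),
      pvRel matrix v vis →
      pvRel matrix (pvMidLoop matrix threshold f stack (v, block)).1
          (pvWalk (pvLive matrix threshold) f stack (vis, block)).1 ∧
        (pvMidLoop matrix threshold f stack (v, block)).2 =
          (pvWalk (pvLive matrix threshold) f stack (vis, block)).2 := by
  intro f
  induction f with
  | zero => intro stack v vis block h; exact ⟨h, rfl⟩
  | succ f ih =>
    intro stack v vis block h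
    cases stack with
    | nil => exact ⟨h, rfl⟩
    | cons p rest =>
      obtain ⟨r, c⟩ := p
      rw [pvMidLoop, pvWalk]
      rw [← pv_guard_eq matrix threshold v vis h r c]
      by_cases hbad : pvBad matrix threshold v r c = true
      · rw [if_pos hbad, if_pos hbad]
        exact ih rest v vis block h
      · rw [if_neg hbad, if_neg hbad]
        exact ih _ _ _ _ (pv_rel_sv matrix threshold v vis r c h hbad)

-- fold two related loops over the same index list.
lemma pv_fold_rel {σ τ β : Type} (R : σ → τ → Prop) (f : σ → β → σ) (g : τ → β → τ) :
    ∀ (l : List β), (∀ x ∈ l, ∀ a b, R a b → R (f a x) (g b x)) →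
      ∀ (a : σ) (b : τ), R a b → R (l.foldl f a) (l.foldl g b) := by
  intro l
  induction l with
  | nil => intro _ a b h; exact h
  | cons x t ih =>
    intro hstep a b h
    exact ih (fun y hy => hstep y (by simp [hy])) _ _ (hstep x (by simp) a b h)

-- A's outer-loop guard equals Source B's outer-loop guard under the correspondence.
lemma pv_outer_guard (matrix : List (List Int)) (threshold : Int) (v : List (List Bool))
    (vis : PySem.Set (Int × Int)) (h : pvRel matrix v vis) (i j : Nat)
    (hi : i < matrix.length) (hj : j < (matrix.headD []).length) :
    (!pvGV v (i : Int) (j : Int) && decide (threshold < pvGM matrix (i : Int) (j : Int))) =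
      (PySem.Set.contains (pvLive matrix threshold) ((i : Int), (j : Int)) &&
        !(PySem.Set.contains vis ((i : Int), (j : Int)))) := by
  have h1 : (0 : Int) ≤ (i : Int) := by positivity
  have h2 : (i : Int) < (matrix.length : Int) := by exact_mod_cast hi
  have h3 : (0 : Int) ≤ (j : Int) := by positivity
  have h4 : (j : Int) < ((matrix.headD []).length : Int) := by exact_mod_cast hj
  have hlive : PySem.Set.contains (pvLive matrix threshold) ((i : Int), (j : Int)) =
      decide (threshold < pvGM matrix (i : Int) (j : Int)) := by
    rw [Bool.eq_iff_iff]
    simp only [PySem.Set.contains_iff, pv_live_mem, decide_eq_true_eq]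
    exact ⟨fun hm => hm.2.2.2.2, fun hth => ⟨h1, h2, h3, h4, hth⟩⟩
  have hvis : PySem.Set.contains vis ((i : Int), (j : Int)) = pvGV v (i : Int) (j : Int) := by
    rw [Bool.eq_iff_iff, PySem.Set.contains_iff]
    exact (h.2 (i : Int) (j : Int) h1 h2 h3 h4).symm
  rw [hlive, hvis, Bool.and_comm]

-- ===== assembling the two steps =====

-- step 1: A equals the fold whose bodies are the 2D-grid stack loop.
lemma pv_A_eq_mid (matrix : List (List Int)) (threshold : Int) :
    block_diagonalize matrix threshold =
      ((List.range matrix.length).foldl (fun acc (i : Nat) =>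
        (List.range (matrix.headD []).length).foldl (fun acc (j : Nat) =>
          if !pvGV acc.1 (i : Int) (j : Int) && decide (threshold < pvGM matrix (i : Int) (j : Int)) then
            let res := pvMidLoop matrix threshold
              (4 * (matrix.length * (matrix.headD []).length) + 1) [((i : Int), (j : Int))] (acc.1, [])
            (res.1, acc.2 ++ [res.2])
          else acc) acc)
        ((List.replicate matrix.length (List.replicate (matrix.headD []).length false), []) :
          List (List Bool) × List (List (Int × Int)))).2 := by
  unfold block_diagonalize
  simp only []
  have key : ∀ (acc : List (List Bool) × List (List (Int × Int))), pvDims matrix acc.1 →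
      (List.range matrix.length).foldl (fun acc (i : Nat) =>
        (List.range (matrix.headD []).length).foldl (fun acc (j : Nat) =>
          if !pvGV acc.1 (i : Int) (j : Int) && decide (threshold < pvGM matrix (i : Int) (j : Int)) then
            let res := pvDfsA matrix threshold (matrix.length * (matrix.headD []).length + 1) (i : Int) (j : Int) (acc.1, [])
            (res.1, acc.2 ++ [res.2])
          else acc) acc) acc =
      (List.range matrix.length).foldl (fun acc (i : Nat) =>
        (List.range (matrix.headD []).length).foldl (fun acc (j : Nat) =>
          if !pvGV acc.1 (i : Int) (j : Int) && decide (threshold < pvGM matrix (i : Int) (j : Int)) then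
            let res := pvMidLoop matrix threshold (4 * (matrix.length * (matrix.headD []).length) + 1) [((i : Int), (j : Int))] (acc.1, [])
            (res.1, acc.2 ++ [res.2])
          else acc) acc) acc := by
    set P : List (List Bool) × List (List (Int × Int)) → Prop := fun acc => pvDims matrix acc.1 with hP
    have innerPres : ∀ (i : Nat) (acc : List (List Bool) × List (List (Int × Int))) (j : Nat), P acc →
        P (if !pvGV acc.1 (i : Int) (j : Int) && decide (threshold < pvGM matrix (i : Int) (j : Int)) then
            let res := pvDfsA matrix threshold (matrix.length * (matrix.headD []).length + 1) (i : Int) (j : Int) (acc.1, [])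
            (res.1, acc.2 ++ [res.2])
          else acc) := by
      intro i acc j ha
      split
      · exact (pv_dfs_dims_unvis matrix threshold _ _ _ (acc.1, []) ha).1
      · exact ha
    have innerEq : ∀ (i : Nat) (acc : List (List Bool) × List (List (Int × Int))) (j : Nat), P acc →
        (if !pvGV acc.1 (i : Int) (j : Int) && decide (threshold < pvGM matrix (i : Int) (j : Int)) then
            let res := pvDfsA matrix threshold (matrix.length * (matrix.headD []).length + 1) (i : Int) (j : Int) (acc.1, [])
            (res.1, acc.2 ++ [res.2])
          else acc) =
        (if !pvGV acc.1 (i : Int) (j : Int) && decide (threshold < pvGM matrix (i : Int) (j : Int)) then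
            let res := pvMidLoop matrix threshold (4 * (matrix.length * (matrix.headD []).length) + 1) [((i : Int), (j : Int))] (acc.1, [])
            (res.1, acc.2 ++ [res.2])
          else acc) := by
      intro i acc j ha
      split
      · simp only [pv_body_eq matrix threshold acc.1 ha (i : Int) (j : Int)]
      · rfl
    intro acc hacc
    refine pv_foldl_eq_of P _ _ ?_ ?_ _ _ hacc
    · intro a i ha
      exact pv_foldl_eq_of P _ _ (innerEq i) (innerPres i) _ a ha
    · intro a i ha
      exact pv_foldl_preserves P _ (innerPres i) _ a ha
  have hinit : pvDims matrix (List.replicate matrix.length (List.replicate (matrix.headD []).length false)) := by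
    constructor
    · simp
    · intro row hrow
      rw [List.eq_of_mem_replicate hrow]
      simp
  rw [key _ hinit]

-- the correspondence holds at the start (all-false grid, empty set).
lemma pv_rel_init (matrix : List (List Int)) :
    pvRel matrix (List.replicate matrix.length (List.replicate (matrix.headD []).length false))
      PySem.Set.empty := by
  refine ⟨⟨by simp, fun row hrow => by rw [List.eq_of_mem_replicate hrow]; simp⟩, ?_⟩
  intro r c h1 h2 h3 h4
  have hgv : pvGV (List.replicate matrix.length (List.replicate (matrix.headD []).length false))
      r c = false := by
    unfold pvGV
    have hb1 : r.toNat <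
        (List.replicate matrix.length (List.replicate (matrix.headD []).length false)).length := by
      rw [List.length_replicate]; omega
    rw [List.getD_eq_getElem _ _ hb1, List.getElem_replicate]
    have hb2 : c.toNat < (List.replicate (matrix.headD []).length false).length := by
      rw [List.length_replicate]; omega
    rw [List.getD_eq_getElem _ _ hb2, List.getElem_replicate]
  constructor
  · intro hgv'
    rw [hgv] at hgv'
    exact absurd hgv' (by simp)
  · intro hm
    exact absurd hm (by simp [PySem.Set.empty])

-- ===== VERDICT (by name: the statement is the Claim_ definition above) =====
theorem block_diagonalize_spec : Claim_equal_block_diagonalize := by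
  intro matrix threshold _ _
  unfold Spec_block_diagonalize
  rw [pv_A_eq_mid]
  unfold block_diagonalize_alt
  simp only []
  set R : (List (List Bool) × List (List (Int × Int))) →
      (PySem.Set (Int × Int) × List (List (Int × Int))) → Prop :=
    fun a b => pvRel matrix a.1 b.1 ∧ a.2 = b.2 with hR
  have main := pv_fold_rel R
    (fun acc (i : Nat) =>
      (List.range (matrix.headD []).length).foldl (fun acc (j : Nat) =>
        if !pvGV acc.1 (i : Int) (j : Int) && decide (threshold < pvGM matrix (i : Int) (j : Int)) then
          let res := pvMidLoop matrix threshold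
            (4 * (matrix.length * (matrix.headD []).length) + 1) [((i : Int), (j : Int))] (acc.1, [])
          (res.1, acc.2 ++ [res.2])
        else acc) acc)
    (fun acc (i : Nat) =>
      (List.range (matrix.headD []).length).foldl (fun acc (j : Nat) =>
        if PySem.Set.contains (pvLive matrix threshold) ((i : Int), (j : Int)) &&
            !(PySem.Set.contains acc.1 ((i : Int), (j : Int))) then
          let res := pvWalk (pvLive matrix threshold)
            (4 * (matrix.length * (matrix.headD []).length) + 1) [((i : Int), (j : Int))] (acc.1, [])
          (res.1, acc.2 ++ [res.2])
        else acc) acc)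
    (List.range matrix.length) ?_
    (List.replicate matrix.length (List.replicate (matrix.headD []).length false), [])
    (PySem.Set.empty, []) ⟨pv_rel_init matrix, rfl⟩
  · exact main.2
  · intro i hi a b hab
    refine pv_fold_rel R _ _ (List.range (matrix.headD []).length) ?_ a b hab
    intro j hj a b hab
    rw [List.mem_range] at hi hj
    rw [pv_outer_guard matrix threshold a.1 b.1 hab.1 i j hi hj]
    by_cases hg : (PySem.Set.contains (pvLive matrix threshold) ((i : Int), (j : Int)) &&
        !(PySem.Set.contains b.1 ((i : Int), (j : Int)))) = true
    · rw [if_pos hg, if_pos hg]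
      have hsim := pv_walk_sim matrix threshold
        (4 * (matrix.length * (matrix.headD []).length) + 1) [((i : Int), (j : Int))]
        a.1 b.1 [] hab.1
      refine ⟨?_, ?_⟩
      · exact hsim.1
      · simp only [hab.2, hsim.2]
    · rw [if_neg hg, if_neg hg]
      exact hab
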